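-- pv_equiv track=rewrite | github.com/ByeonYeongsin/algorithm_test | 15_divide_and_conquer/01_17829.py | pooling
-- ===== SOURCE A (Python) =====
-- def pooling(nums, n):
--     if n == 1:
--         return nums[0][0]
--     new_map = [[] for _ in range(n//2)]
--
--     for i in range(0, n, 2):
--         for j in range(0, n, 2):
--             # now_pool = []
--             # now_pool.append(nums[i][j])
--             # now_pool.append(nums[i][j+1])
--             # now_pool.append(nums[i+1][j])
--             # now_pool.append(nums[i+1][j+1])
--             # now_pool.sort()
--             now_pool = [nums[i][j], nums[i][j+1], nums[i+1][j], nums[i+1][j+1]]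
--             now_pool.sort()
--             new_map[i//2].append(now_pool[2])
--     return pooling(new_map, n//2)
-- ===== SOURCE B (Python) =====
-- def pooling(nums, n):
--     # Top-down quadtree: the pooled value of a size-s block is the third-smallest
--     # of its four quadrants' pooled values; no intermediate grids are built.
--     def val(i, j, s):
--         if s == 1:
--             return nums[i][j]
--         h = s // 2
--         return sorted((val(i, j, h), val(i, j + h, h),
--                        val(i + h, j, h), val(i + h, j + h, h)))[2]
--     return val(0, 0, n)
-- ===== Notes on version B (the rewrite author's own statement) =====
-- stated objective: alternative
-- what changed: B computes the answer by a top-down quadtree recursion on (row, col, block size) -- the pooled value of a block is the third-smallest of its four quadrants' pooled values -- instead of A's bottom-up rebuilding of a halved grid at every level; no intermediate maps are allocated.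
import Mathlib
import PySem

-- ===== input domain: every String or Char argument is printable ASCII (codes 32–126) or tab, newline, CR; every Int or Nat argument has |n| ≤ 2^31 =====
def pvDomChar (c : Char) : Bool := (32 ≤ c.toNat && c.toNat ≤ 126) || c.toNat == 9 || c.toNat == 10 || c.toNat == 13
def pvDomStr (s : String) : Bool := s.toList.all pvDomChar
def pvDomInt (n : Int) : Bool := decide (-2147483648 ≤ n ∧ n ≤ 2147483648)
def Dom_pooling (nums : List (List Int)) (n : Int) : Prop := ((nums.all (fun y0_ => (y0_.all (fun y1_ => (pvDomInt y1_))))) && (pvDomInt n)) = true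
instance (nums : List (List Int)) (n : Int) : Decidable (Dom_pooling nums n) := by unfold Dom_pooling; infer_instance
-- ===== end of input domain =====

-- B replaces A's bottom-up level-by-level grid rebuilding by a top-down quadtree recursion on
-- (row, col, block size); same cost, no intermediate grids (objective: alternative).

-- nums[i][j] (always in range on inputs admitted by Pre_, so the defaults are never used there)
def pvCell (nums : List (List Int)) (i j : Int) : Int :=
  PySem.List.pyGetD (PySem.List.pyGetD nums i []) j 0

-- ===== PORT A =====
-- sorted([nums[i][j], nums[i][j+1], nums[i+1][j], nums[i+1][j+1]])[2] — A's per-block value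
def pvBlock (nums : List (List Int)) (i j : Int) : Int :=
  PySem.List.pyGetD
    (PySem.List.sorted [pvCell nums i j, pvCell nums i (j+1), pvCell nums (i+1) j, pvCell nums (i+1) (j+1)] (fun x => x)) 2 0

-- fuel bounds the recursion depth (n halves each call; n.toNat + 1 is enough); inside Pre_ it is never exhausted
def poolingGo (fuel : Nat) (nums : List (List Int)) (n : Int) : Int :=
  match fuel with
  | 0 => 0
  | fuel + 1 =>
    if n = 1 then pvCell nums 0 0
    else if n ≤ 0 then 0  -- Python recurses forever when n ≤ 0; totality guard, outside Pre_
    else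
      -- new_map = [[] for _ in range(n//2)]; for i in range(0,n,2): for j …: new_map[i//2].append(now_pool[2])
      let new_map :=
        (PySem.List.pyRange 0 n 2).foldl (fun nm i =>
          (PySem.List.pyRange 0 n 2).foldl (fun nm j =>
            nm.modify (PySem.Int.floordiv i 2).toNat (fun row => row ++ [pvBlock nums i j])) nm)
          (List.replicate (PySem.Int.floordiv n 2).toNat [])
      poolingGo fuel new_map (PySem.Int.floordiv n 2)

def pooling (nums : List (List Int)) (n : Int) : Int := poolingGo (n.toNat + 1) nums n

-- ===== PORT B =====
-- Source B's val(i, j, s): quadtree descent; fuel = recursion depth (s halves each call; exhausted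
-- only where the Python recursion never bottoms out, s ≤ 0 — outside Pre_)
def valGo (fuel : Nat) (nums : List (List Int)) (i j s : Int) : Int :=
  match fuel with
  | 0 => 0
  | fuel + 1 =>
    if s = 1 then pvCell nums i j
    else
      let h := PySem.Int.floordiv s 2
      PySem.List.pyGetD
        (PySem.List.sorted
          [valGo fuel nums i j h, valGo fuel nums i (j + h) h,
           valGo fuel nums (i + h) j h, valGo fuel nums (i + h) (j + h) h] (fun x => x)) 2 0

def pooling_alt (nums : List (List Int)) (n : Int) : Int := valGo (n.toNat + 1) nums 0 0 n

-- ===== PRECONDITION & SPEC =====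
-- Pre_ admits exactly the inputs on which Python A returns: n a power of two (k < 32 is no loss, Dom
-- bounds |n| ≤ 2^31) and the first n rows present with ≥ n entries each; on every other input A
-- raises IndexError or recurses without end (RecursionError).
def Pre_pooling (nums : List (List Int)) (n : Int) : Prop :=
  (∃ k < 32, n = 2 ^ (k : Nat)) ∧ n.toNat ≤ nums.length ∧
    ∀ row ∈ nums.take n.toNat, n.toNat ≤ row.length
instance (nums : List (List Int)) (n : Int) : Decidable (Pre_pooling nums n) := by
  unfold Pre_pooling; infer_instance

def pvWitness_pooling : List (List Int) × Int := ([[1, 2], [3, 4]], 2)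

def Spec_pooling (nums : List (List Int)) (n : Int) (out : Int) : Prop := out = pooling_alt nums n
instance (nums : List (List Int)) (n : Int) (out : Int) : Decidable (Spec_pooling nums n out) := by unfold Spec_pooling; infer_instance

-- ===== CLAIM (what is proved, stated in full; the proofs are below) =====
def Claim_equal_pooling : Prop := ∀ (nums : List (List Int)) (n : Int), Dom_pooling nums n → Pre_pooling nums n → Spec_pooling nums n (pooling nums n)

-- ===== LEMMAS AND PROOFS =====

theorem pv_modify_id {α : Type} (l : List α) (i : Nat) : (l.modify i fun x => x) = l := by
  refine List.ext_getElem (by simp) ?_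
  intro j h1 h2
  simp [List.getElem_modify]

theorem pv_modify_modify {α : Type} (l : List α) (i : Nat) (f g : α → α) :
    (l.modify i f).modify i g = l.modify i (fun x => g (f x)) := by
  refine List.ext_getElem (by simp) ?_
  intro j h1 h2
  simp only [List.getElem_modify]
  split_ifs <;> rfl

theorem pv_modify_append {α : Type} (xs : List α) (y : α) (zs : List α) (f : α → α) :
    (xs ++ y :: zs).modify xs.length f = xs ++ f y :: zs := by
  refine List.ext_getElem (by simp) ?_
  intro j h1 h2
  simp only [List.getElem_modify]
  by_cases h : xs.length = j
  · subst h
    simp [List.getElem_append_right (Nat.le_refl _)]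
  · rcases Nat.lt_or_ge j xs.length with hj | hj
    · simp [h, List.getElem_append_left hj]
    · rw [if_neg h, List.getElem_append_right (by omega), List.getElem_append_right (by omega)]
      obtain ⟨d, hd⟩ : ∃ d, j - xs.length = d + 1 := ⟨j - xs.length - 1, by omega⟩
      simp [hd]

-- A's inner j-loop appends one block value per j to row t
theorem pv_inner_loop (J : List Int) (t : Nat) (nm : List (List Int)) (g : Int → Int) :
    J.foldl (fun nm j => nm.modify t (fun row => row ++ [g j])) nm
      = nm.modify t (fun row => row ++ J.map g) := by
  induction J generalizing nm with
  | nil => simp [pv_modify_id]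
  | cons j J ih =>
    simp only [List.foldl_cons, List.map_cons, ih, pv_modify_modify]
    simp

-- a left-to-right pass that modifies row t at step t turns the preallocated empty rows into F t []
theorem pv_outer_loop (m : Nat) (F : Nat → List Int → List Int) (extra : List (List Int)) :
    (List.range m).foldl (fun nm t => nm.modify t (F t))
        (List.replicate m ([] : List Int) ++ extra)
      = (List.range m).map (fun t => F t []) ++ extra := by
  induction m generalizing extra with
  | zero => simp
  | succ m ih =>
    rw [List.range_succ, List.foldl_append, List.replicate_succ', List.append_assoc,
        List.singleton_append, ih ([] :: extra)]
    simp only [List.foldl_cons, List.foldl_nil]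
    have hma := pv_modify_append ((List.range m).map (fun t => F t [])) ([] : List Int) extra (F m)
    have hlen : ((List.range m).map (fun t => F t [])).length = m := by simp
    rw [hlen] at hma
    rw [hma, List.map_append]
    simp

theorem pv_range2 (m : Nat) (hm : 0 < m) :
    PySem.List.pyRange 0 (2 * (m : Int)) 2
      = (List.range m).map (fun t : Nat => ((2 : Int) * (t : Int))) := by
  rw [PySem.List.pyRange_of_pos 0 (2 * (m : Int)) (by omega)]
  have h1 : (if (0 : Int) < 2 * (m : Int) then ((2 * (m : Int) - 0 + 2 - 1) / 2).toNat else 0) = m := by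
    rw [if_pos (by omega)]; omega
  rw [h1]
  exact List.map_congr_left (fun k _ => by omega)

theorem pv_fd2 (t : Nat) : (PySem.Int.floordiv (2 * (t : Int)) 2).toNat = t := by
  rw [PySem.Int.floordiv_eq_ediv_of_pos (by omega)]; omega

-- the pooled grid A builds in one recursion step, in closed form
def pvStep (nums : List (List Int)) (m : Nat) : List (List Int) :=
  (List.range m).map (fun t : Nat =>
    (List.range m).map (fun s : Nat => pvBlock nums (2 * (t : Int)) (2 * (s : Int))))

theorem pv_stepA_eq (nums : List (List Int)) (m : Nat) (hm : 0 < m) :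
    (PySem.List.pyRange 0 (2 * (m : Int)) 2).foldl (fun nm i =>
        (PySem.List.pyRange 0 (2 * (m : Int)) 2).foldl (fun nm j =>
          nm.modify (PySem.Int.floordiv i 2).toNat (fun row => row ++ [pvBlock nums i j])) nm)
        (List.replicate m ([] : List Int))
      = pvStep nums m := by
  rw [pv_range2 m hm, List.foldl_map]
  simp only [pv_fd2, pv_inner_loop]
  unfold pvStep
  simpa [Function.comp] using pv_outer_loop m
    (fun t row => row ++ ((List.range m).map (fun s : Nat => ((2 : Int) * (s : Int)))).map
      (fun j => pvBlock nums (2 * (t : Int)) j)) []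

-- reading a cell of the pooled grid gives the block value
theorem pv_cell_step (nums : List (List Int)) (m t s : Nat) (ht : t < m) (hs : s < m) :
    pvCell (pvStep nums m) (t : Int) (s : Int) = pvBlock nums (2 * (t : Int)) (2 * (s : Int)) := by
  unfold pvCell pvStep
  rw [PySem.List.pyGetD_natCast, PySem.List.pyGetD_natCast]
  have hrow : ((List.range m).map (fun t : Nat =>
        (List.range m).map (fun s : Nat => pvBlock nums (2 * (t : Int)) (2 * (s : Int))))).getD t []
      = (List.range m).map (fun s : Nat => pvBlock nums (2 * (t : Int)) (2 * (s : Int))) := by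
    rw [List.getD_eq_getElem _ _ (by simpa using ht)]
    simp
  rw [hrow, List.getD_eq_getElem _ _ (by simpa using hs)]
  simp

theorem pv_fd_pow (k : Nat) : PySem.Int.floordiv ((2 : Int) ^ (k + 1)) 2 = (2 : Int) ^ k := by
  rw [PySem.Int.floordiv_eq_ediv_of_pos (by omega), pow_succ]
  omega

theorem pv_pow_ne_one (k : Nat) : ¬ ((2 : Int) ^ (k + 1) = 1) := by
  have h := pow_pos (show (0 : Int) < 2 by omega) k
  rw [pow_succ]
  omega

-- the quadtree value of a size-2^(k+1) block of nums equals the size-2^k block value on the pooled grid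
theorem pv_quad_step (nums : List (List Int)) (m : Nat) : ∀ (k : Nat), ∀ (f1 f2 : Nat),
    k < f1 → k + 1 < f2 → ∀ (t s : Nat), t + 2 ^ k ≤ m → s + 2 ^ k ≤ m →
    valGo f2 nums (2 * (t : Int)) (2 * (s : Int)) ((2 : Int) ^ (k + 1))
      = valGo f1 (pvStep nums m) (t : Int) (s : Int) ((2 : Int) ^ k) := by
  intro k
  induction k with
  | zero =>
    intro f1 f2 h1 h2 t s ht hs
    obtain ⟨g1, rfl⟩ : ∃ g, f1 = g + 1 := ⟨f1 - 1, by omega⟩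
    obtain ⟨g2, rfl⟩ : ∃ g, f2 = g + 1 := ⟨f2 - 1, by omega⟩
    obtain ⟨g3, rfl⟩ : ∃ g, g2 = g + 1 := ⟨g2 - 1, by omega⟩
    rw [valGo, if_neg (pv_pow_ne_one 0), pv_fd_pow 0]
    simp only [valGo, pow_zero]
    rw [pv_cell_step nums m t s (by omega) (by omega)]
    rfl
  | succ k ih =>
    intro f1 f2 h1 h2 t s ht hs
    obtain ⟨g1, rfl⟩ : ∃ g, f1 = g + 1 := ⟨f1 - 1, by omega⟩
    obtain ⟨g2, rfl⟩ : ∃ g, f2 = g + 1 := ⟨f2 - 1, by omega⟩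
    simp only [valGo, if_neg (pv_pow_ne_one (k + 1)), if_neg (pv_pow_ne_one k), pv_fd_pow]
    have hp2 : (2 : Nat) ^ (k + 1) = 2 ^ k + 2 ^ k := by rw [pow_succ]; omega
    have hgp : 0 < (2 : Nat) ^ k := Nat.two_pow_pos k
    rw [hp2] at ht hs
    have e1 : (2 : Int) * (t : Int) + 2 ^ (k + 1) = 2 * ((t + 2 ^ k : Nat) : Int) := by
      push_cast; ring
    have e2 : (2 : Int) * (s : Int) + 2 ^ (k + 1) = 2 * ((s + 2 ^ k : Nat) : Int) := by
      push_cast; ring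
    have e3 : (t : Int) + 2 ^ k = ((t + 2 ^ k : Nat) : Int) := by push_cast; ring
    have e4 : (s : Int) + 2 ^ k = ((s + 2 ^ k : Nat) : Int) := by push_cast; ring
    rw [e1, e2, e3, e4,
        ih g1 g2 (by omega) (by omega) t s (by omega) (by omega),
        ih g1 g2 (by omega) (by omega) t (s + 2 ^ k) (by omega) (by omega),
        ih g1 g2 (by omega) (by omega) (t + 2 ^ k) s (by omega) (by omega),
        ih g1 g2 (by omega) (by omega) (t + 2 ^ k) (s + 2 ^ k) (by omega) (by omega)]

theorem pv_main : ∀ (k : Nat), ∀ (f1 f2 : Nat), k < f1 → k < f2 → ∀ (nums : List (List Int)),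
    poolingGo f1 nums ((2 : Int) ^ k) = valGo f2 nums 0 0 ((2 : Int) ^ k) := by
  intro k
  induction k with
  | zero =>
    intro f1 f2 h1 h2 nums
    obtain ⟨g1, rfl⟩ : ∃ g, f1 = g + 1 := ⟨f1 - 1, by omega⟩
    obtain ⟨g2, rfl⟩ : ∃ g, f2 = g + 1 := ⟨f2 - 1, by omega⟩
    simp [poolingGo, valGo]
  | succ k ih =>
    intro f1 f2 h1 h2 nums
    obtain ⟨g1, rfl⟩ : ∃ g, f1 = g + 1 := ⟨f1 - 1, by omega⟩
    have hp : (0 : Int) < (2 : Int) ^ k := pow_pos (by omega) k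
    have hn : ((2 : Int) ^ (k + 1)) = 2 * ((2 ^ k : Nat) : Int) := by push_cast; ring
    rw [poolingGo, if_neg (pv_pow_ne_one k), if_neg (by rw [pow_succ]; omega), pv_fd_pow k]
    have htk : (((2 : Int) ^ k).toNat) = 2 ^ k := by
      have : ((2 : Int) ^ k) = ((2 ^ k : Nat) : Int) := by push_cast; ring
      rw [this]; omega
    rw [htk, hn, pv_stepA_eq nums (2 ^ k) (Nat.two_pow_pos k)]
    show poolingGo g1 (pvStep nums (2 ^ k)) ((2 : Int) ^ k)
      = valGo f2 nums 0 0 (2 * ((2 ^ k : Nat) : Int))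
    rw [← hn, ih g1 (k + 1) (by omega) (by omega) (pvStep nums (2 ^ k))]
    have hq := pv_quad_step nums (2 ^ k) k (k + 1) f2 (by omega) h2 0 0
      (by have := Nat.two_pow_pos k; omega) (by have := Nat.two_pow_pos k; omega)
    simpa using hq.symm

-- ===== VERDICT (by name: the statement is the Claim_ definition above) =====
theorem pooling_spec : Claim_equal_pooling := by
  intro nums n _ hpre
  obtain ⟨⟨k, _, rfl⟩, _, _⟩ := hpre
  unfold Spec_pooling
  show poolingGo _ _ _ = valGo _ _ _ _ _
  have hf : k < ((2 : Int) ^ (k : Nat)).toNat := by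
    have hlt : k < 2 ^ k := Nat.lt_two_pow_self
    have h2 : ((2 : Int) ^ (k : Nat)).toNat = 2 ^ k := by
      have : ((2 : Int) ^ (k : Nat)) = ((2 ^ k : Nat) : Int) := by push_cast; ring
      rw [this]; omega
    omega
  exact pv_main k _ _ (by omega) (by omega) nums
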